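-- pv_equiv track=rewrite | github.com/jbartucz/AdventOfCode-2024 | AOC2024_day0702.py | squeezerec
-- ===== SOURCE A (Python) =====
-- def squeezerec(lst):
--
--     toreturn = list()
--     if len(lst) == 2:
--         toreturn.append([lst[0],lst[1]])
--         toreturn.append([int(str(lst[0])+str(lst[1]))])
--         return toreturn
--
--     vals = squeezerec(lst[:-1])
--     for v in vals:
--         toreturn.append(v + [lst[-1]])
--         toreturn.append(v[:-1] + [int(str(v[-1])+str(lst[-1]))])
--     return toreturn
-- ===== SOURCE B (Python) =====
-- def squeezerec(lst):
--     vals = [[lst[0], lst[1]], [int(str(lst[0]) + str(lst[1]))]]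
--     for e in lst[2:]:
--         vals = [w for v in vals
--                   for w in (v + [e], v[:-1] + [int(str(v[-1]) + str(e))])]
--     return vals
-- ===== Notes on version B (the rewrite author's own statement) =====
-- stated objective: simpler
-- what changed: Replaces the self-recursion on lst[:-1] by a single left-to-right loop that rebuilds the list of groupings with a flat comprehension, doubling it at each element.
import Mathlib
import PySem

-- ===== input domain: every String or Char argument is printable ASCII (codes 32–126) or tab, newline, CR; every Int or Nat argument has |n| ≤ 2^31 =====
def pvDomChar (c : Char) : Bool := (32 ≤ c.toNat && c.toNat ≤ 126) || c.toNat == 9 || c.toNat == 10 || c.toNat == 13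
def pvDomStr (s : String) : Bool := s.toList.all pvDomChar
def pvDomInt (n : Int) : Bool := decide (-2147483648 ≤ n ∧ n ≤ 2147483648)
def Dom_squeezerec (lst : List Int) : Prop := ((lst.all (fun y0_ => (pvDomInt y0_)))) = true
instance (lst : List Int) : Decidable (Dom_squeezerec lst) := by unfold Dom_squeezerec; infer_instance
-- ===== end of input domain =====

-- B replaces A's recursion on lst[:-1] by one left-to-right loop over lst[2:] (simpler decomposition, same cost).

-- int(str(a) + str(b)); Python raises ValueError when b < 0, which Pre_ excludes, so the default 0 is never the claimed value
def pvConcat (a b : Int) : Int := (PySem.Int.ofStr? (PySem.Int.toStr a ++ PySem.Int.toStr b)).getD 0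

-- ===== PORT A =====
def squeezerec (lst : List Int) : List (List Int) :=
  if lst.length = 2 then
    [[PySem.List.pyGetD lst 0 0, PySem.List.pyGetD lst 1 0],
     [pvConcat (PySem.List.pyGetD lst 0 0) (PySem.List.pyGetD lst 1 0)]]
  else if lst.length < 2 then []  -- Python recurses forever here (RecursionError); excluded by Pre_
  else
    let vals := squeezerec (PySem.List.slice lst none (some (-1)))
    vals.foldl (fun acc v =>
      acc ++ [v ++ [PySem.List.pyGetD lst (-1) 0],
              PySem.List.slice v none (some (-1)) ++
                [pvConcat (PySem.List.pyGetD v (-1) 0) (PySem.List.pyGetD lst (-1) 0)]]) []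
termination_by lst.length
decreasing_by
  simp only [PySem.List.slice_to_neg_one, List.length_dropLast]; omega

-- ===== PORT B =====
def squeezerec_alt (lst : List Int) : List (List Int) :=
  match lst with
  | a :: b :: rest =>
      rest.foldl (fun vals e =>
        vals.flatMap (fun v =>
          [v ++ [e],
           PySem.List.slice v none (some (-1)) ++
             [pvConcat (PySem.List.pyGetD v (-1) 0) e]]))
        [[a, b], [pvConcat a b]]
  | _ => []  -- Source B raises IndexError on lst[0]/lst[1] here; excluded by Pre_

-- ===== PRECONDITION & SPEC =====
-- Pre_ excludes lists of length < 2 (A raises RecursionError) and lists with a negative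
-- element after the first (int(str(x)+str(y)) raises ValueError on a negative right part).
def Pre_squeezerec (lst : List Int) : Prop := 2 ≤ lst.length ∧ ∀ x ∈ lst.tail, 0 ≤ x
instance (lst : List Int) : Decidable (Pre_squeezerec lst) := by unfold Pre_squeezerec; infer_instance
def pvWitness_squeezerec : List Int := [12, 3, 45]

def Spec_squeezerec (lst : List Int) (out : List (List Int)) : Prop := out = squeezerec_alt lst
instance (lst : List Int) (out : List (List Int)) : Decidable (Spec_squeezerec lst out) := by unfold Spec_squeezerec; infer_instance

-- ===== CLAIM (what is proved, stated in full; the proofs are below) =====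
def Claim_equal_squeezerec : Prop := ∀ (lst : List Int), Dom_squeezerec lst → Pre_squeezerec lst → Spec_squeezerec lst (squeezerec lst)

-- ===== LEMMAS AND PROOFS =====

theorem squeezerec_main (a b : Int) (rest : List Int) :
    squeezerec (a :: b :: rest) = squeezerec_alt (a :: b :: rest) := by
  induction rest using List.reverseRecOn with
  | nil => simp [squeezerec, squeezerec_alt, PySem.List.pyGetD]
  | append_singleton rest e ih =>
      rw [show a :: b :: (rest ++ [e]) = (a :: b :: rest) ++ [e] by simp]
      rw [squeezerec]
      have hlen : ((a :: b :: rest) ++ [e]).length = rest.length + 3 := by simp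
      rw [if_neg (by omega), if_neg (by omega)]
      simp only [PySem.List.slice_to_neg_one, List.dropLast_concat,
        PySem.List.pyGetD_neg_one_append_singleton, ih,
        PySem.List.foldl_append_eq_flatMap, List.nil_append]
      show _ = squeezerec_alt ((a :: b :: rest) ++ [e])
      simp only [squeezerec_alt, List.cons_append, List.foldl_append, List.foldl_cons, List.foldl_nil, PySem.List.slice_to_neg_one]

-- ===== VERDICT (by name: the statement is the Claim_ definition above) =====
theorem squeezerec_spec : Claim_equal_squeezerec := by
  intro lst _ hpre
  unfold Spec_squeezerec
  match lst, hpre with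
  | a :: b :: rest, _ => exact squeezerec_main a b rest
  | [], ⟨h, _⟩ => simp at h
  | [a], ⟨h, _⟩ => simp at h
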